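-- pv_equiv track=rewrite | github.com/kushalthaman/tex-to-tb-xls | syllabary_finnish.py | eval_onset
-- ===== SOURCE A (Python) =====
-- def eval_onset(template):
--     count = 0
--     for char in template:
--         if char == 'C':
--             count += 1
--         else:
--             break
--
--     return count > 1
-- ===== SOURCE B (Python) =====
-- def eval_onset(template):
--     return template.startswith('CC')
-- ===== Notes on version B (the rewrite author's own statement) =====
-- stated objective: simpler
-- what changed: Replaced the counting loop (count leading occurrences of the letter C, then compare count > 1) with a single closed-form prefix test via str.startswith on the two-letter CC prefix.
import Mathlib
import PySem

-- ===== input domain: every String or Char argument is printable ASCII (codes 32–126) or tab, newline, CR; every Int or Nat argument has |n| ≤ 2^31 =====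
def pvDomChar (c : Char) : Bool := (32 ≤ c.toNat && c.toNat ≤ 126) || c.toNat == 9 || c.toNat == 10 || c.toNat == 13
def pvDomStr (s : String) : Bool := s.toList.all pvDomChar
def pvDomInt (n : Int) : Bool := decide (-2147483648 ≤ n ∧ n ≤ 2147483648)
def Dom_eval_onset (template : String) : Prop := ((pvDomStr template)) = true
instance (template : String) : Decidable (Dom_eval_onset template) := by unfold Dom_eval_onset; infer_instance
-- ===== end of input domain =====

-- B replaces A's counting loop (count leading 'C's, then compare > 1) with the
-- closed-form prefix check template.startswith("CC"); objective: simpler.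

-- ===== PORT A =====
-- the for-loop with break: count leading 'C's, stop at the first non-'C'
def evalOnsetLoop : List Char → Nat
  | [] => 0
  | c :: rest => if c = 'C' then evalOnsetLoop rest + 1 else 0

def eval_onset (template : String) : Bool :=
  decide (evalOnsetLoop template.toList > 1)

-- ===== PORT B =====
def eval_onset_alt (template : String) : Bool :=
  PySem.Str.startswith template "CC"

-- ===== PRECONDITION & SPEC =====
def Spec_eval_onset (template : String) (out : Bool) : Prop := out = eval_onset_alt template
instance (template : String) (out : Bool) : Decidable (Spec_eval_onset template out) := by unfold Spec_eval_onset; infer_instance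

-- ===== CLAIM (what is proved, stated in full; the proofs are below) =====
def Claim_equal_eval_onset : Prop := ∀ (template : String), Dom_eval_onset template → Spec_eval_onset template (eval_onset template)

-- ===== LEMMAS AND PROOFS =====
theorem evalOnsetLoop_gt_one_iff (cs : List Char) :
    evalOnsetLoop cs > 1 ↔ ['C', 'C'] <+: cs := by
  match cs with
  | [] => simp [evalOnsetLoop]
  | [c] =>
    simp only [evalOnsetLoop]
    constructor
    · intro h; split at h <;> omega
    · intro h; exact absurd (List.IsPrefix.length_le h) (by simp)
  | c :: d :: rest =>
    by_cases hc : c = 'C' <;> by_cases hd : d = 'C' <;>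
      simp [evalOnsetLoop, hc, hd, List.cons_prefix_cons, eq_comm]

-- ===== VERDICT (by name: the statement is the Claim_ definition above) =====
theorem eval_onset_spec : Claim_equal_eval_onset := by
  intro template _
  unfold Spec_eval_onset eval_onset eval_onset_alt
  simp only [PySem.Str.startswith_eq]
  rw [Bool.eq_iff_iff, PySem.Chars.startswith_iff, decide_eq_true_iff]
  exact evalOnsetLoop_gt_one_iff template.toList
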